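-- pv_equiv track=rewrite | github.com/k4west/Algorithm | 프로그래머스/2/131704. 택배상자/택배상자.py | solution
-- ===== SOURCE A (Python) =====
-- def solution(order):
--     truck, sub = 0, []; s = 1
--     for i in order:
--         f = True
--         if s <= i:
--             sub.extend([*range(s,i)])
--             truck += 1
--             f = False
--             s = i+1
--         elif sub and i == sub[-1]:
--             sub.pop()
--             truck+=1
--             f = False
--         if f: break
--     return truck
-- ===== SOURCE B (Python) =====
-- def solution(order):
--     # No stack: a delivered-set plus the observation that the stack's top is
--     # always the largest box below the conveyor pointer not yet delivered.
--     truck = 0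
--     delivered = set()
--     s = 1
--     for i in order:
--         if i >= s:
--             s = i + 1
--         else:
--             t = s - 1
--             while t in delivered:
--                 t -= 1
--             if t < 1 or t != i:
--                 break
--         delivered.add(i)
--         truck += 1
--     return truck
-- ===== Notes on version B (the rewrite author's own statement) =====
-- stated objective: alternative
-- what changed: B keeps no stack at all: it maintains a set of delivered boxes and an explicit conveyor pointer, and derives A's stack top on demand as the largest not-yet-delivered box below the pointer (a downward scan past delivered boxes), replacing A's extend(range)/pop stack bookkeeping and its f break-flag.
import Mathlib
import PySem

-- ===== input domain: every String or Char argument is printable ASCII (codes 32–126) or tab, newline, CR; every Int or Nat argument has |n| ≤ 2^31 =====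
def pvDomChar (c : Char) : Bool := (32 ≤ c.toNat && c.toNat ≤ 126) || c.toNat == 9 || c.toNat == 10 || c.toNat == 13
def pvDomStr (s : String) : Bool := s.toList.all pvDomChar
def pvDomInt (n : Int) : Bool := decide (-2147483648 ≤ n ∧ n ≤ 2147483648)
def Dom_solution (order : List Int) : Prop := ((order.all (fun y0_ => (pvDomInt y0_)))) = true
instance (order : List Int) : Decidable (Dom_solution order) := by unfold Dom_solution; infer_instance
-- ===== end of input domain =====

-- B drops A's explicit stack: it keeps a delivered-set and derives the stack top
-- as the largest undelivered box below the conveyor pointer (objective: alternative).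

-- ===== PORT A =====
-- the for-loop with its break flag: recursion over `order` with state (truck, sub, s)
def solutionGo : List Int → Int → List Int → Int → Int
  | [], truck, _, _ => truck
  | i :: rest, truck, sub, s =>
    if s ≤ i then
      solutionGo rest (truck + 1) (sub ++ PySem.List.pyRange s i 1) (i + 1)
    else if sub ≠ [] ∧ sub.getLast? = some i then
      solutionGo rest (truck + 1) sub.dropLast s
    else truck

def solution (order : List Int) : Int := solutionGo order 0 [] 1

-- ===== PORT B =====
-- termination fact for the `while t in delivered: t -= 1` scan (cited by findTop's decreasing_by)
theorem pvFilterLe_lt (l : List Int) (t : Int) (h : t ∈ l) :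
    (l.filter (fun x => decide (x ≤ t - 1))).length < (l.filter (fun x => decide (x ≤ t))).length := by
  induction l with
  | nil => simp at h
  | cons a l ih =>
    have mono : (l.filter (fun x => decide (x ≤ t - 1))).length ≤ (l.filter (fun x => decide (x ≤ t))).length :=
      (List.monotone_filter_right l (by intro x hx; simp_all; omega)).length_le
    rcases List.mem_cons.mp h with rfl | hm <;>
      · simp only [List.filter_cons]
        split_ifs <;> simp_all <;> omega

-- the `t = s - 1; while t in delivered: t -= 1` scan of Source B
def findTop (delivered : List Int) (t : Int) : Int :=
  if h : t ∈ delivered then findTop delivered (t - 1) else t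
termination_by (delivered.filter (fun x => decide (x ≤ t))).length
decreasing_by exact pvFilterLe_lt delivered t h

-- the for-loop of Source B: recursion over `order` with state (truck, delivered, s)
def solutionAltGo : List Int → Int → PySem.Set Int → Int → Int
  | [], truck, _, _ => truck
  | i :: rest, truck, delivered, s =>
    if s ≤ i then
      solutionAltGo rest (truck + 1) (PySem.Set.add delivered i) (i + 1)
    else
      let t := findTop delivered (s - 1)
      if t < 1 ∨ t ≠ i then truck
      else solutionAltGo rest (truck + 1) (PySem.Set.add delivered i) s

def solution_alt (order : List Int) : Int := solutionAltGo order 0 PySem.Set.empty 1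

-- ===== PRECONDITION & SPEC =====
def Spec_solution (order : List Int) (out : Int) : Prop := out = solution_alt order
instance (order : List Int) (out : Int) : Decidable (Spec_solution order out) := by unfold Spec_solution; infer_instance

-- ===== CLAIM (what is proved, stated in full; the proofs are below) =====
def Claim_equal_solution : Prop := ∀ (order : List Int), Dom_solution order → Spec_solution order (solution order)

-- ===== LEMMAS AND PROOFS =====

-- the scan finds the last element of the undelivered part of 1..m (or 0 when there is none)
theorem findTop_eq (delivered : List Int) (m : Int)
    (hd : ∀ x ∈ delivered, 1 ≤ x) (hm : 0 ≤ m) :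
    findTop delivered m
      = ((PySem.List.pyRange 1 (m + 1) 1).filter (fun x => decide (x ∉ delivered))).getLastD 0 := by
  fun_induction findTop delivered m with
  | case1 t h ih =>
    have ht : 1 ≤ t := hd t h
    rw [ih (by omega)]
    rw [PySem.List.pyRange_one_succ_right (a := 1) (b := t) ht]
    simp [List.filter_append, h]
  | case2 t h =>
    by_cases ht : 1 ≤ t
    · rw [PySem.List.pyRange_one_succ_right (a := 1) (b := t) ht]
      simp [List.filter_append, h]
    · have : t = 0 := by omega
      subst this
      have hnil : PySem.List.pyRange (1:Int) (0 + 1) 1 = [] := PySem.List.pyRange_one_eq_nil (by omega)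
      rw [hnil]; simp

theorem go_eq (rest : List Int) (truck : Int) (delivered : List Int) (s : Int)
    (hd : ∀ x ∈ delivered, 1 ≤ x ∧ x < s) (hs : 1 ≤ s) :
    solutionGo rest truck ((PySem.List.pyRange 1 s 1).filter (fun x => decide (x ∉ delivered))) s
      = solutionAltGo rest truck delivered s := by
  induction rest generalizing truck delivered s with
  | nil => rfl
  | cons i rest ih =>
    set sub := (PySem.List.pyRange 1 s 1).filter (fun x => decide (x ∉ delivered)) with hsub
    simp only [solutionGo, solutionAltGo]
    by_cases h : s ≤ i
    · rw [if_pos h, if_pos h]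
      have hrw : (PySem.List.pyRange 1 (i + 1) 1).filter
            (fun x => decide (x ∉ PySem.Set.add delivered i)) = sub ++ PySem.List.pyRange s i 1 := by
        rw [PySem.List.pyRange_one_append 1 s (i + 1) hs (by omega),
            PySem.List.pyRange_one_succ_right (a := s) (b := i) h,
            List.filter_append, List.filter_append]
        have h1 : (PySem.List.pyRange 1 s 1).filter (fun x => decide (x ∉ PySem.Set.add delivered i)) = sub := by
          rw [hsub]
          apply List.filter_congr
          intro x hx
          have hb := PySem.List.mem_pyRange_one.mp hx
          simp [PySem.Set.mem_add]
          omega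
        have h2 : (PySem.List.pyRange s i 1).filter (fun x => decide (x ∉ PySem.Set.add delivered i)) =
            PySem.List.pyRange s i 1 := by
          apply List.filter_eq_self.mpr
          intro x hx
          have hb := PySem.List.mem_pyRange_one.mp hx
          have : x ∉ delivered := fun hc => by have := hd x hc; omega
          simp [PySem.Set.mem_add]
          exact ⟨this, by omega⟩
        have h3 : ([i].filter (fun x => decide (x ∉ PySem.Set.add delivered i)) : List Int) = [] := by
          simp [PySem.Set.mem_add]
        rw [h1, h2, h3, List.append_nil]
      rw [← hrw]
      apply ih
      · intro x hx
        rcases (PySem.Set.mem_add _ _ _).mp hx with hx' | rfl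
        · have := hd x hx'; omega
        · omega
      · omega
    · rw [if_neg h, if_neg h]
      have hm : s - 1 + 1 = s := by omega
      have htopD : findTop delivered (s - 1) = sub.getLastD 0 := by
        rw [findTop_eq delivered (s - 1) (fun x hx => (hd x hx).1) (by omega), hm, ← hsub]
      by_cases hne : sub = []
      · -- stack empty: both sides break and return truck
        have h0 : findTop delivered (s - 1) = 0 := by rw [htopD, hne]; rfl
        rw [if_neg (by rintro ⟨hc, -⟩; exact hc hne), if_pos (by rw [h0]; left; omega)]
      · have hg : sub.getLastD 0 = sub.getLast hne := by
          rw [List.getLastD_eq_getLast?, List.getLast?_eq_some_getLast hne]; rfl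
        have hlast : sub.getLast? = some (sub.getLastD 0) := by
          rw [hg]; exact List.getLast?_eq_some_getLast hne
        have hmem : sub.getLastD 0 ∈ sub := by rw [hg]; exact List.getLast_mem hne
        have hbounds : 1 ≤ sub.getLastD 0 ∧ sub.getLastD 0 < s := by
          have hx := List.filter_sublist.subset hmem
          have := PySem.List.mem_pyRange_one.mp hx
          omega
        by_cases heq : sub.getLastD 0 = i
        · -- successful pop on both sides
          rw [if_pos ⟨hne, heq ▸ hlast⟩,
              if_neg (by rw [htopD]; exact fun hc => hc.elim (fun hlt => by omega) (fun hne2 => hne2 heq))]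
          have hnodupsub : sub.Nodup := (PySem.List.nodup_pyRange_one _ _).sublist List.filter_sublist
          have hsplit : sub = sub.dropLast ++ [i] := by
            conv_lhs => rw [← List.dropLast_concat_getLast hne]
            rw [← hg, heq]
          have hinot : i ∉ sub.dropLast := by
            have hn := hnodupsub
            rw [hsplit] at hn
            have := List.disjoint_of_nodup_append hn
            intro hc; exact this hc (by simp)
          have hrw : (PySem.List.pyRange 1 s 1).filter
              (fun x => decide (x ∉ PySem.Set.add delivered i)) = sub.dropLast := by
            have hcomp : (PySem.List.pyRange 1 s 1).filter
                (fun x => decide (x ∉ PySem.Set.add delivered i))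
                = sub.filter (fun x => decide (x ≠ i)) := by
              rw [hsub, List.filter_filter]
              apply List.filter_congr
              intro x hx
              by_cases h1 : x ∈ delivered <;> by_cases h2 : x = i <;>
                simp [PySem.Set.mem_add, h1, h2]
            rw [hcomp]
            conv_lhs => rw [hsplit]
            rw [List.filter_append]
            have h3 : (([i] : List Int).filter (fun x => decide (x ≠ i))) = [] := by simp
            rw [h3, List.append_nil]
            apply List.filter_eq_self.mpr
            intro x hx
            simp only [decide_eq_true_eq, ne_eq]
            intro hc; subst hc; exact hinot hx
          rw [← hrw]
          apply ih
          · intro x hx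
            rcases (PySem.Set.mem_add _ _ _).mp hx with hx' | rfl
            · exact hd x hx'
            · omega
          · exact hs
        · -- failed match: both sides break and return truck
          rw [if_neg (by rintro ⟨-, hq⟩; rw [hlast] at hq; exact heq (Option.some.inj hq)),
              if_pos (by rw [htopD]; right; exact heq)]

-- ===== VERDICT (by name: the statement is the Claim_ definition above) =====
theorem solution_spec : Claim_equal_solution := by
  intro order _
  unfold Spec_solution solution solution_alt
  have := go_eq order 0 [] 1 (by simp) (by omega)
  rw [PySem.List.pyRange_one_eq_nil (a := 1) (b := 1) (by omega)] at this
  simpa [PySem.Set.empty] using this
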